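-- pv_equiv track=rewrite | github.com/EdoardoDiLisio/Esercizi | verifica delle conoscenze lezione 7/prova2.py | aggrega_voti
-- ===== SOURCE A (Python) =====
-- def aggrega_voti(voti: list[dict]) -> dict[str:list[int]]:
--     aggregated_grades = {}
--     for student in voti:
--         name = student["nome"]
--         grade = student["voto"]
--         if name not in aggregated_grades:
--             aggregated_grades[name] = []
--         aggregated_grades[name].append(grade)
--     return aggregated_grades
-- ===== SOURCE B (Python) =====
-- def aggrega_voti(voti: list[dict]) -> dict:
--     # Distinct names in first-appearance order, then one grade-list comprehension per name.
--     names = list(dict.fromkeys(s["nome"] for s in voti))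
--     return {n: [s["voto"] for s in voti if s["nome"] == n] for n in names}
-- ===== Notes on version B (the rewrite author's own statement) =====
-- stated objective: idiomatic
-- what changed: Replaces the mutate-a-dict accumulation loop by a declarative two-phase form: dedup the names in first-appearance order with dict.fromkeys, then build each grade list with a filter comprehension per name.
import Mathlib
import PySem

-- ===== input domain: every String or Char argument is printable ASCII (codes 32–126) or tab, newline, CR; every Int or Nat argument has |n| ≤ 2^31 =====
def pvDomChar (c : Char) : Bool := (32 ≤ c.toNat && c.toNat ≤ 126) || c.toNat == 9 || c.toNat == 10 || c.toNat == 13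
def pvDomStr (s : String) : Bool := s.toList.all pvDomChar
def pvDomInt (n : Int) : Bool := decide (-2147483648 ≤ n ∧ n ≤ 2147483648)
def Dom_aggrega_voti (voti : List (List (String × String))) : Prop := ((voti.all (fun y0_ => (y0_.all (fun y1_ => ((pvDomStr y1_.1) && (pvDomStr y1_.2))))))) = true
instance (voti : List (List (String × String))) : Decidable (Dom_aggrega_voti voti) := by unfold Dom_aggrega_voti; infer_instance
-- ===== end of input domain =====

-- ===== PORT A =====
-- B groups grades per name with dict.fromkeys + one comprehension per name instead of A's single mutate-a-dict loop (idiomatic, not faster); Pre_ excludes students missing a key, where both Pythons raise KeyError.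
-- student[k]; under Pre_ the key is present, so the "" default of getD is never used
def pvItem (s : List (String × String)) (k : String) : String := (PySem.Dict.mk s).getD k ""

def aggrega_voti (voti : List (List (String × String))) : List (String × List String) :=
  (voti.foldl
    (fun d student =>
      let name := pvItem student "nome"
      let grade := pvItem student "voto"
      let d' := if PySem.Dict.contains d name = false then PySem.Dict.insert d name [] else d
      PySem.Dict.modify d' name [] (fun l => l ++ [grade]))
    PySem.Dict.empty).items

-- ===== PORT B =====
def aggrega_voti_alt (voti : List (List (String × String))) : List (String × List String) :=
  let names := PySem.List.dedup (voti.map (fun s => pvItem s "nome"))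
  names.map (fun n =>
    (n, (voti.filter (fun s => pvItem s "nome" == n)).map (fun s => pvItem s "voto")))

-- ===== PRECONDITION & SPEC =====
-- exactly the inputs where A returns: every student dict has both keys "nome" and "voto" (else Python raises KeyError)
def Pre_aggrega_voti (voti : List (List (String × String))) : Prop :=
  (voti.all (fun s => PySem.Dict.contains (PySem.Dict.mk s) "nome" && PySem.Dict.contains (PySem.Dict.mk s) "voto")) = true
instance (voti : List (List (String × String))) : Decidable (Pre_aggrega_voti voti) := by unfold Pre_aggrega_voti; infer_instance
def pvWitness_aggrega_voti : (List (List (String × String))) :=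
  [[("nome", "ada"), ("voto", "30")], [("nome", "bob"), ("voto", "18")], [("nome", "ada"), ("voto", "25")]]

def Spec_aggrega_voti (voti : List (List (String × String))) (out : List (String × List String)) : Prop := out = aggrega_voti_alt voti
instance (voti : List (List (String × String))) (out : List (String × List String)) : Decidable (Spec_aggrega_voti voti out) := by unfold Spec_aggrega_voti; infer_instance

-- ===== CLAIM (what is proved, stated in full; the proofs are below) =====
def Claim_equal_aggrega_voti : Prop := ∀ (voti : List (List (String × String))), Dom_aggrega_voti voti → Pre_aggrega_voti voti → Spec_aggrega_voti voti (aggrega_voti voti)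

-- ===== LEMMAS AND PROOFS =====

-- A's conditional "insert [] then append" step is the unconditional modify-with-default step
theorem step_eq (d : PySem.Dict String (List String)) (name grade : String) :
    PySem.Dict.modify (if PySem.Dict.contains d name = false then PySem.Dict.insert d name [] else d) name [] (fun l => l ++ [grade])
      = PySem.Dict.modify d name [] (fun l => l ++ [grade]) := by
  split_ifs with h
  · have h2 : (d.items.any fun p => p.1 == name) = false := h
    have h3 := List.any_eq_false.mp h2
    have hf : List.find? (fun p => p.1 == name) d.items = none := List.find?_eq_none.mpr h3
    simp [PySem.Dict.modify, PySem.Dict.insert, PySem.Dict.contains, PySem.Dict.getD, PySem.Dict.get?, h2, hf, List.any_append, List.find?_append]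
    nth_rewrite 2 [← List.map_id d.items]
    apply List.map_congr_left
    intro p hp
    have hne : p.1 ≠ name := by simpa using h3 p hp
    simp [hne]
  · rfl

-- a Dict with Nodup keys is the map of its keys to their values
theorem items_eq_map_keys (d : PySem.Dict String (List String)) (h : d.keys.Nodup) :
    d.items = d.keys.map (fun k => (k, d.getD k [])) := by
  have : d.keys.map (fun k => (k, d.getD k [])) = d.items.map (fun p => (p.1, d.getD p.1 [])) := by
    simp [PySem.Dict.keys, List.map_map]
  rw [this]
  nth_rewrite 1 [← List.map_id d.items]
  apply List.map_congr_left
  intro p hp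
  have := PySem.Dict.getD_of_mem_items (d := d) (k := p.1) (v := p.2) (by simpa using hp) h (d0 := [])
  simp [this]

theorem main_eq (voti : List (List (String × String))) :
    aggrega_voti voti = aggrega_voti_alt voti := by
  unfold aggrega_voti aggrega_voti_alt
  have hstep : (fun (d : PySem.Dict String (List String)) (student : List (String × String)) =>
      let name := pvItem student "nome"
      let grade := pvItem student "voto"
      let d' := if PySem.Dict.contains d name = false then PySem.Dict.insert d name [] else d
      PySem.Dict.modify d' name [] (fun l => l ++ [grade]))
      = (fun d s => PySem.Dict.modify d (pvItem s "nome") [] (fun l => l ++ [pvItem s "voto"])) :=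
    funext fun d => funext fun s => step_eq d _ _
  rw [hstep]
  set F := voti.foldl (fun d s => PySem.Dict.modify d (pvItem s "nome") [] (fun l => l ++ [pvItem s "voto"])) PySem.Dict.empty with hF
  have hkeys : F.keys = PySem.Set.ofList (voti.map (fun s => pvItem s "nome")) := by
    rw [hF, PySem.Dict.keys_foldl_modify_key]
    simp [PySem.Set.update_nil_left]
  have hget : ∀ c, F.getD c [] = (voti.filter (fun s => pvItem s "nome" == c)).map (fun s => pvItem s "voto") := by
    intro c
    have hmap : F = (voti.map (fun s => (pvItem s "nome", pvItem s "voto"))).foldl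
        (fun d p => PySem.Dict.modify d p.1 [] (fun l => l ++ [p.2])) PySem.Dict.empty := by
      rw [hF, List.foldl_map]
    rw [hmap, PySem.Dict.getD_foldl_modify_append]
    simp [List.filter_map, List.map_map, Function.comp_def]
  rw [items_eq_map_keys F (by rw [hkeys]; exact PySem.Set.nodup_ofList _), hkeys]
  simp only [PySem.List.dedup_eq_ofList]
  apply List.map_congr_left
  intro n _
  rw [hget n]

-- ===== VERDICT (by name: the statement is the Claim_ definition above) =====
theorem aggrega_voti_spec : Claim_equal_aggrega_voti := by
  intro voti _ _
  unfold Spec_aggrega_voti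
  exact main_eq voti
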